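-- pv_equiv track=rewrite | github.com/d4g10ur0s/Multidimesnional_Data_Structures_2023 | domes/code/rTree.py | getJ
-- ===== SOURCE A (Python) =====
-- def getJ(e1, e2,l):
--     tI = []
--     for i in range(l):
--         interval_1 = e1[i]
--         interval_2 = e2[i]
--         #1. to 2 mesa sto 1 h isa
--         if interval_2[1] <= interval_1[1] and interval_2[0]>=interval_1[0]:
--             tI.append( (interval_1[0], interval_1[1]) )
--         #2. to 1 mesa sto 2
--         elif interval_1[1] <= interval_2[1] and interval_1[0]>=interval_2[0]:
--             tI.append( (interval_2[0], interval_2[1]) )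
--         #3. to 1 mikrotero mikrotero meros kai to 2 megalutero megalutero
--         elif interval_1[0] <= interval_2[0] and interval_1[1] <= interval_2[1]:
--             tI.append( (interval_1[0], interval_2[1]) )
--         #4. to 2 mikrotero mikrotero meros kai to 1 megalutero megalutero
--         elif interval_2[0] <= interval_1[0] and interval_2[1] <= interval_1[1]:
--             tI.append( (interval_2[0], interval_1[1]) )
--     #return tI
--     return tI
-- ===== SOURCE B (Python) =====
-- def getJ(e1, e2, l):
--     if l <= 0:
--         return []
--     (a1, b1), (a2, b2) = e1[0], e2[0]
--     return [(a1 if a1 <= a2 else a2, b1 if b1 >= b2 else b2)] + getJ(e1[1:], e2[1:], l - 1)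
-- ===== Notes on version B (the rewrite author's own statement) =====
-- stated objective: simpler
-- what changed: Replaces A's index loop with a four-way geometric case analysis and an accumulator by structural recursion that consumes both lists head-first, emitting the union interval (smaller low, larger high) of the two head intervals and recursing on the tails with l-1.
import Mathlib
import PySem

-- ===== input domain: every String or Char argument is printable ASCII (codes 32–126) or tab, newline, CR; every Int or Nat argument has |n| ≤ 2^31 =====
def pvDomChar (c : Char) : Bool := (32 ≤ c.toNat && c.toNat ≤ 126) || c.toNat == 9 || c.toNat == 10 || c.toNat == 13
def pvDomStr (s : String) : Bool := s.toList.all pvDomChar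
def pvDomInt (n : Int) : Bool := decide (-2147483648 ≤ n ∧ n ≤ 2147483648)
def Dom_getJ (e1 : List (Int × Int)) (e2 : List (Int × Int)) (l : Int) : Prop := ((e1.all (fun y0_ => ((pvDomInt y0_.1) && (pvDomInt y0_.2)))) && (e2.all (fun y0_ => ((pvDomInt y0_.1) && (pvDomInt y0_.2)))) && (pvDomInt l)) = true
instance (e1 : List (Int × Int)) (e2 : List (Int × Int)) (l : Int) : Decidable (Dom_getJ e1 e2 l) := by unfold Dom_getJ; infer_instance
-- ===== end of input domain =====

-- B replaces A's index loop + four-way interval case analysis + accumulator by head-first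
-- structural recursion on the two lists, emitting the union interval per step: simpler, same O(l) cost.

-- ===== PORT A =====
def getJ (e1 : List (Int × Int)) (e2 : List (Int × Int)) (l : Int) : List (Int × Int) :=
  (PySem.List.pyRange 0 l 1).foldl (fun tI i =>
    let interval_1 := PySem.List.pyGetD e1 i (0, 0)
    let interval_2 := PySem.List.pyGetD e2 i (0, 0)
    if interval_2.2 ≤ interval_1.2 ∧ interval_2.1 ≥ interval_1.1 then
      tI ++ [(interval_1.1, interval_1.2)]
    else if interval_1.2 ≤ interval_2.2 ∧ interval_1.1 ≥ interval_2.1 then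
      tI ++ [(interval_2.1, interval_2.2)]
    else if interval_1.1 ≤ interval_2.1 ∧ interval_1.2 ≤ interval_2.2 then
      tI ++ [(interval_1.1, interval_2.2)]
    else if interval_2.1 ≤ interval_1.1 ∧ interval_2.2 ≤ interval_1.2 then
      tI ++ [(interval_2.1, interval_1.2)]
    else tI) []

-- ===== PORT B =====
-- e1[0] raises IndexError on an empty list when l > 0; those inputs are outside Pre_getJ, so pyGetD's
-- default is never reached there. e1[1:] is PySem.List.slice e1 (some 1) none.
def getJ_alt (e1 : List (Int × Int)) (e2 : List (Int × Int)) (l : Int) : List (Int × Int) :=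
  if l ≤ 0 then []
  else
    let p1 := PySem.List.pyGetD e1 0 (0, 0)
    let p2 := PySem.List.pyGetD e2 0 (0, 0)
    [(if p1.1 ≤ p2.1 then p1.1 else p2.1, if p1.2 ≥ p2.2 then p1.2 else p2.2)] ++
      getJ_alt (PySem.List.slice e1 (some 1) none) (PySem.List.slice e2 (some 1) none) (l - 1)
termination_by l.toNat
decreasing_by omega

-- ===== PRECONDITION & SPEC =====
-- Pre_: Python A raises IndexError when l exceeds the length of e1 or e2; exactly those inputs are excluded.
def Pre_getJ (e1 : List (Int × Int)) (e2 : List (Int × Int)) (l : Int) : Prop :=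
  l ≤ (e1.length : Int) ∧ l ≤ (e2.length : Int)
instance (e1 : List (Int × Int)) (e2 : List (Int × Int)) (l : Int) : Decidable (Pre_getJ e1 e2 l) := by unfold Pre_getJ; infer_instance
def pvWitness_getJ : (List (Int × Int)) × (List (Int × Int)) × Int := ([(0, 3), (1, 2)], [(1, 4), (0, 1)], 2)

def Spec_getJ (e1 : List (Int × Int)) (e2 : List (Int × Int)) (l : Int) (out : List (Int × Int)) : Prop := out = getJ_alt e1 e2 l
instance (e1 : List (Int × Int)) (e2 : List (Int × Int)) (l : Int) (out : List (Int × Int)) : Decidable (Spec_getJ e1 e2 l out) := by unfold Spec_getJ; infer_instance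

-- ===== CLAIM (what is proved, stated in full; the proofs are below) =====
def Claim_equal_getJ : Prop := ∀ (e1 : List (Int × Int)) (e2 : List (Int × Int)) (l : Int), Dom_getJ e1 e2 l → Pre_getJ e1 e2 l → Spec_getJ e1 e2 l (getJ e1 e2 l)

-- ===== LEMMAS AND PROOFS =====

-- A's exhaustive case analysis always appends exactly (min of lows, max of highs).
theorem getJ_step_eq (tI : List (Int × Int)) (I1 I2 : Int × Int) :
    (if I2.2 ≤ I1.2 ∧ I2.1 ≥ I1.1 then tI ++ [(I1.1, I1.2)]
     else if I1.2 ≤ I2.2 ∧ I1.1 ≥ I2.1 then tI ++ [(I2.1, I2.2)]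
     else if I1.1 ≤ I2.1 ∧ I1.2 ≤ I2.2 then tI ++ [(I1.1, I2.2)]
     else if I2.1 ≤ I1.1 ∧ I2.2 ≤ I1.2 then tI ++ [(I2.1, I1.2)]
     else tI) = tI ++ [(min I1.1 I2.1, max I1.2 I2.2)] := by
  split_ifs <;> simp_all [min_def, max_def] <;> try omega

-- B's recursion, characterised as the same map over range(l) that A's fold amounts to.
theorem getJ_alt_eq_map (e1 e2 : List (Int × Int)) (l : Int)
    (h1 : l ≤ (e1.length : Int)) (h2 : l ≤ (e2.length : Int)) :
    getJ_alt e1 e2 l = (PySem.List.pyRange 0 l 1).map (fun i =>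
      (min (PySem.List.pyGetD e1 i (0, 0)).1 (PySem.List.pyGetD e2 i (0, 0)).1,
       max (PySem.List.pyGetD e1 i (0, 0)).2 (PySem.List.pyGetD e2 i (0, 0)).2)) := by
  induction e1 generalizing e2 l with
  | nil =>
    rw [getJ_alt]
    simp at h1
    simp [if_pos h1, PySem.List.pyRange_one_eq_nil h1]
  | cons p t ih =>
    rw [getJ_alt]
    by_cases hl : l ≤ 0
    · simp [if_pos hl, PySem.List.pyRange_one_eq_nil hl]
    · simp only [if_neg hl, PySem.List.slice_from_one, List.tail_cons]
      match e2, h2 with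
      | [], h2 => simp at h2; omega
      | q :: t2, h2 =>
        simp only [List.tail_cons]
        rw [ih t2 (l - 1) (by simp at h1 ⊢; omega) (by simp at h2 ⊢; omega)]
        conv_rhs => rw [PySem.List.pyRange_one_cons (show (0:Int) < l by omega)]
        simp only [List.map_cons, List.singleton_append, List.cons.injEq]
        constructor
        · simp only [PySem.List.pyGetD_zero_cons, Prod.mk.injEq, min_def, max_def]
          constructor <;> first
          | trivial
          | (split_ifs <;> omega)
        · rw [PySem.List.pyRange_one (0 + 1) l, PySem.List.pyRange_one 0 (l - 1)]
          simp only [List.map_map, show l - (0 + 1) = l - 1 - 0 from by ring]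
          apply List.map_congr_left
          intro k _
          simp only [Function.comp]
          have e1' : PySem.List.pyGetD (p :: t) (0 + 1 + (k : Int)) (0, 0)
              = PySem.List.pyGetD t (k : Int) (0, 0) := by
            rw [show (0 + 1 + (k : Int)) = ((k + 1 : Nat) : Int) by push_cast; ring,
                PySem.List.pyGetD_natCast, PySem.List.pyGetD_natCast]
            simp [List.getD]
          have e2' : PySem.List.pyGetD (q :: t2) (0 + 1 + (k : Int)) (0, 0)
              = PySem.List.pyGetD t2 (k : Int) (0, 0) := by
            rw [show (0 + 1 + (k : Int)) = ((k + 1 : Nat) : Int) by push_cast; ring,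
                PySem.List.pyGetD_natCast, PySem.List.pyGetD_natCast]
            simp [List.getD]
          rw [e1', e2']
          simp

-- ===== VERDICT (by name: the statement is the Claim_ definition above) =====
theorem getJ_spec : Claim_equal_getJ := by
  intro e1 e2 l _ hpre
  unfold Spec_getJ getJ
  rw [PySem.List.foldl_congr_mem (g := fun tI i =>
        tI ++ [(min (PySem.List.pyGetD e1 i (0, 0)).1 (PySem.List.pyGetD e2 i (0, 0)).1,
                max (PySem.List.pyGetD e1 i (0, 0)).2 (PySem.List.pyGetD e2 i (0, 0)).2)])
      (h := fun tI i _ => getJ_step_eq tI _ _)]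
  rw [PySem.List.foldl_append_singleton_eq_map]
  rw [getJ_alt_eq_map e1 e2 l hpre.1 hpre.2]
  simp
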